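-- pv_equiv track=rewrite | github.com/acid2023/1st_bot | calc.py | two_arguements_check
-- ===== SOURCE A (Python) =====
-- def two_arguements_check(string):
--     operators_char = '*/+'
--     if string.count('-') > 2:
--         return False  #для минуса и двух аргументов может быть максимум два минуса - один как оператор и второй как знак
--     for o in operators_char:
--         if len(string.split(o)) > 2:  #максимум один опертаор кроме минуса = два аргумента после разбиения
--             return False
--     return True
-- ===== SOURCE B (Python) =====
-- def two_arguements_check(string):
--     # Sort-then-scan: extract the operator characters, sort them so equal
--     # operators are adjacent, and reject on a run of two (or, for '-', three).
--     ops = sorted(c for c in string if c in '*/+-')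
--     prev = None
--     run = 0
--     for c in ops:
--         run = run + 1 if c == prev else 1
--         prev = c
--         if run > (2 if c == '-' else 1):
--             return False
--     return True
-- ===== Notes on version B (the rewrite author's own statement) =====
-- stated objective: alternative
-- what changed: B replaces A's minus-count check plus three split-and-measure passes with a sort-then-scan: it extracts the operator characters, sorts them so equal operators are adjacent, and rejects on a run of two equal neighbours (three for the minus sign), which is correct because in a sorted list the longest run of a character equals its count.
import Mathlib
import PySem

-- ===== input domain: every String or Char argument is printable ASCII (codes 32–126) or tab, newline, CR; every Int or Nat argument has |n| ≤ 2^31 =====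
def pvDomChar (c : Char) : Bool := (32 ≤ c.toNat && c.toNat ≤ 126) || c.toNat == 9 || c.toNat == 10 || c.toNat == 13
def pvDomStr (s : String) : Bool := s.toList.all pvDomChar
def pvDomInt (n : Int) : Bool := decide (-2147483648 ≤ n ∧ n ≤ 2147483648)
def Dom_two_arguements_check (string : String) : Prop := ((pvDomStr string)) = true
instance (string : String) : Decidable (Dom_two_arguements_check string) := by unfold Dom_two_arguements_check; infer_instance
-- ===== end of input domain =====

-- B sorts the extracted operator characters and rejects on a too-long run of equal
-- neighbours (sort-then-scan), instead of A's count('-') check plus three split passes.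
-- Same value on every input.

-- ===== PORT A =====
-- 'for o in operators_char: if len(string.split(o)) > 2: return False' ; string.split(o) with a
-- one-char nonempty sep is exactly PySem.Chars.splitOn string.toList [o] (Str.split? = some of it).
def twoArgCheckLoopA (string : String) : List Char → Bool
  | [] => true
  | o :: rest =>
    if 2 < (PySem.Chars.splitOn string.toList [o]).length then false
    else twoArgCheckLoopA string rest

def two_arguements_check (string : String) : Bool :=
  if 2 < PySem.Str.count string "-" then false
  else twoArgCheckLoopA string "*/+".toList

-- ===== PORT B =====
-- 'for c in ops: run = run+1 if c == prev else 1; prev = c; if run > (2 if c == '-' else 1): return False'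
def twoArgScanB : List Char → Option Char → Int → Bool
  | [], _, _ => true
  | c :: rest, prev, run =>
    let run' : Int := if some c == prev then run + 1 else 1
    if (if c == '-' then (2 : Int) else 1) < run' then false
    else twoArgScanB rest (some c) run'

def two_arguements_check_alt (string : String) : Bool :=
  let ops := PySem.List.sorted
    (string.toList.filter (fun c => "*/+-".toList.contains c)) (fun x => x) false
  twoArgScanB ops none 0

-- ===== PRECONDITION & SPEC =====
def Spec_two_arguements_check (string : String) (out : Bool) : Prop := out = two_arguements_check_alt string
instance (string : String) (out : Bool) : Decidable (Spec_two_arguements_check string out) := by unfold Spec_two_arguements_check; infer_instance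

-- ===== CLAIM (what is proved, stated in full; the proofs are below) =====
def Claim_equal_two_arguements_check : Prop := ∀ (string : String), Dom_two_arguements_check string → Spec_two_arguements_check string (two_arguements_check string)

-- ===== LEMMAS AND PROOFS =====

-- allowed multiplicity of each operator character
def twoArgLimit (c : Char) : Int := if c = '-' then 2 else 1

theorem one_le_twoArgLimit (c : Char) : 1 ≤ twoArgLimit c := by
  unfold twoArgLimit; split_ifs <;> omega

-- A-side: count/splitOn with a single-character separator
theorem countGo_single (c : Char) (l : List Char) (fuel acc : Nat) (h : l.length ≤ fuel) :
    PySem.Chars.count.go [c] fuel l acc = acc + l.count c := by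
  induction l generalizing fuel acc with
  | nil => cases fuel <;> simp [PySem.Chars.count.go]
  | cons a t ih =>
    cases fuel with
    | zero => simp at h
    | succ f =>
      rw [PySem.Chars.count.go]
      simp only [List.isPrefixOf, Bool.and_true]
      by_cases hac : c = a
      · subst hac
        simp only [beq_self_eq_true, if_true, List.length_singleton, List.drop_one,
          List.tail_cons]
        rw [ih _ _ (Nat.le_of_succ_le_succ h)]
        simp [List.count_cons_self]
        omega
      · simp only [beq_iff_eq, hac, if_false]
        rw [ih _ _ (Nat.le_of_succ_le_succ h)]
        simp [eq_comm, hac]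

theorem splitOnGo_single_length (c : Char) (l cur : List Char) (acc : List (List Char))
    (fuel : Nat) (h : l.length ≤ fuel) :
    (PySem.Chars.splitOn.go [c] fuel l cur acc).length = acc.length + 1 + l.count c := by
  induction l generalizing fuel cur acc with
  | nil => cases fuel <;> simp [PySem.Chars.splitOn.go]
  | cons a t ih =>
    cases fuel with
    | zero => simp at h
    | succ f =>
      rw [PySem.Chars.splitOn.go]
      simp only [List.isPrefixOf, Bool.and_true]
      by_cases hac : c = a
      · subst hac
        simp only [beq_self_eq_true, if_true, List.length_singleton, List.drop_one,
          List.tail_cons]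
        rw [ih _ _ _ (Nat.le_of_succ_le_succ h)]
        simp [List.count_cons_self]
        omega
      · simp only [beq_iff_eq, hac, if_false]
        rw [ih _ _ _ (Nat.le_of_succ_le_succ h)]
        simp [eq_comm, hac]

theorem chars_count_single (l : List Char) (c : Char) :
    PySem.Chars.count l [c] = l.count c := by
  simp [PySem.Chars.count, countGo_single c l l.length 0 le_rfl]

theorem splitOn_single_length (l : List Char) (c : Char) :
    (PySem.Chars.splitOn l [c]).length = l.count c + 1 := by
  rw [PySem.Chars.splitOn, splitOnGo_single_length c l [] [] (l.length + 1) (Nat.le_succ _)]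
  simp
  omega

theorem portA_true_iff (s : String) :
    two_arguements_check s = true ↔
      (s.toList.count '-' ≤ 2 ∧ s.toList.count '*' ≤ 1 ∧
       s.toList.count '/' ≤ 1 ∧ s.toList.count '+' ≤ 1) := by
  unfold two_arguements_check
  have hm : PySem.Str.count s "-" = s.toList.count '-' := by
    simp [PySem.Str.count_eq]; exact chars_count_single _ _
  rw [hm]
  show _ = true ↔ _
  by_cases h1 : 2 < s.toList.count '-'
  · simp [h1]
  · simp only [h1, if_false]
    show twoArgCheckLoopA s ['*', '/', '+'] = true ↔ _
    simp only [twoArgCheckLoopA, splitOn_single_length]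
    split_ifs <;> simp_all <;> omega

-- B-side: the run scan over a sorted list accepts iff every character's count is within limit
theorem twoArgScanB_sorted (l : List Char) (x : Char) (r : Int)
    (hp : l.Pairwise (· ≤ ·)) (hge : ∀ y ∈ l, x ≤ y) (hr1 : 1 ≤ r) (hrl : r ≤ twoArgLimit x) :
    (twoArgScanB l (some x) r = true ↔
      (r + l.count x ≤ twoArgLimit x ∧
       ∀ c, c ≠ x → (l.count c : Int) ≤ twoArgLimit c)) := by
  induction l generalizing x r with
  | nil =>
    refine ⟨fun _ => ⟨by simp; omega, fun c _ => by
        have := one_le_twoArgLimit c; simp; omega⟩, fun _ => by simp [twoArgScanB]⟩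
  | cons y t ih =>
    have hpt : t.Pairwise (· ≤ ·) := hp.tail
    have hyt : ∀ z ∈ t, y ≤ z := fun z hz => List.rel_of_pairwise_cons hp hz
    by_cases hcy : y = x
    · subst hcy
      simp only [twoArgScanB]
      have hlim : (if (y == '-') = true then (2:Int) else 1) = twoArgLimit y := by
        simp only [beq_iff_eq, twoArgLimit]
      simp only [beq_self_eq_true, if_true, hlim]
      by_cases hb : twoArgLimit y < r + 1
      · simp only [hb, if_true]
        constructor
        · intro h; exact absurd h (by simp)
        · intro ⟨h1, _⟩
          exfalso
          have : (0:Int) ≤ t.count y := by positivity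
          simp only [List.count_cons_self] at h1
          push_cast at h1
          omega
      · simp only [hb, if_false]
        rw [ih y (r+1) hpt hyt (by omega) (by omega)]
        constructor
        · intro ⟨h1, h2⟩
          refine ⟨by simp only [List.count_cons_self]; push_cast; omega, fun c hc => ?_⟩
          rw [List.count_cons_of_ne (Ne.symm hc)]; exact h2 c hc
        · intro ⟨h1, h2⟩
          refine ⟨by simp only [List.count_cons_self] at h1; push_cast at h1 ⊢; omega,
                  fun c hc => ?_⟩
          have := h2 c hc
          rwa [List.count_cons_of_ne (Ne.symm hc)] at this
    · -- y ≠ x: x < y and x below everything, so x never occurs again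
      have hxy : x < y := lt_of_le_of_ne (hge y List.mem_cons_self) (Ne.symm hcy)
      have hxt : x ∉ t := fun hmem => absurd (lt_of_lt_of_le hxy (hyt x hmem)) (lt_irrefl x)
      have hcnt : t.count x = 0 := List.count_eq_zero.mpr hxt
      simp only [twoArgScanB]
      have hne : (some y == some x) = false := by simp [hcy]
      have hlim : (if (y == '-') = true then (2:Int) else 1) = twoArgLimit y := by
        simp only [beq_iff_eq, twoArgLimit]
      rw [hne]
      have hnb : ¬ (twoArgLimit y < 1) := by have := one_le_twoArgLimit y; omega
      simp only [Bool.false_eq_true, if_false, hlim]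
      rw [if_neg hnb]
      rw [ih y 1 hpt hyt le_rfl (one_le_twoArgLimit y)]
      constructor
      · intro ⟨h1, h2⟩
        refine ⟨?_, fun c hc => ?_⟩
        · rw [List.count_cons_of_ne hcy, hcnt]; push_cast; omega
        · by_cases hcy2 : c = y
          · subst hcy2; simp only [List.count_cons_self]; push_cast at h1 ⊢; omega
          · rw [List.count_cons_of_ne (Ne.symm hcy2)]; exact h2 c hcy2
      · intro ⟨_, h2⟩
        refine ⟨?_, fun c hc => ?_⟩
        · have := h2 y hcy
          simp only [List.count_cons_self] at this; push_cast at this ⊢; omega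
        · by_cases hcx : c = x
          · subst hcx; rw [hcnt]
            have := one_le_twoArgLimit c; push_cast; omega
          · have := h2 c hcx
            rwa [List.count_cons_of_ne (Ne.symm hc)] at this

theorem twoArgScanB_top (l : List Char) (hp : l.Pairwise (· ≤ ·)) :
    (twoArgScanB l none 0 = true ↔ ∀ c, (l.count c : Int) ≤ twoArgLimit c) := by
  cases l with
  | nil =>
    refine ⟨fun _ c => by have := one_le_twoArgLimit c; simp; omega,
            fun _ => by simp [twoArgScanB]⟩
  | cons y t =>
    simp only [twoArgScanB]
    have hlim : (if (y == '-') = true then (2:Int) else 1) = twoArgLimit y := by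
      simp only [beq_iff_eq, twoArgLimit]
    rw [show (some y == (none : Option Char)) = false from rfl]
    have hnb : ¬ (twoArgLimit y < 1) := by have := one_le_twoArgLimit y; omega
    simp only [Bool.false_eq_true, if_false, hlim]
    rw [if_neg hnb]
    rw [twoArgScanB_sorted t y 1 hp.tail (fun z hz => List.rel_of_pairwise_cons hp hz) le_rfl
        (one_le_twoArgLimit y)]
    constructor
    · intro ⟨h1, h2⟩ c
      by_cases hcy : c = y
      · subst hcy; simp only [List.count_cons_self]; push_cast at h1 ⊢; omega
      · rw [List.count_cons_of_ne (Ne.symm hcy)]; exact h2 c hcy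
    · intro h
      refine ⟨?_, fun c hc => ?_⟩
      · have := h y; simp only [List.count_cons_self] at this; push_cast at this ⊢; omega
      · have := h c; rwa [List.count_cons_of_ne (Ne.symm hc)] at this

theorem portB_true_iff (s : String) :
    two_arguements_check_alt s = true ↔
      (s.toList.count '-' ≤ 2 ∧ s.toList.count '*' ≤ 1 ∧
       s.toList.count '/' ≤ 1 ∧ s.toList.count '+' ≤ 1) := by
  unfold two_arguements_check_alt
  set f := s.toList.filter (fun c => "*/+-".toList.contains c) with hf
  have hsorted : (PySem.List.sorted f (fun x => x) false).Pairwise (· ≤ ·) :=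
    PySem.List.sorted_pairwise f (fun x => x)
  have hperm : (PySem.List.sorted f (fun x => x) false).Perm f :=
    PySem.List.sorted_perm f (fun x => x) false
  rw [twoArgScanB_top _ hsorted]
  have hcount : ∀ c, (PySem.List.sorted f (fun x => x) false).count c = f.count c :=
    fun c => hperm.count_eq c
  have hfc : ∀ c, f.count c =
      if ("*/+-".toList.contains c) then s.toList.count c else 0 := by
    intro c
    rw [hf]
    by_cases hc : ("*/+-".toList.contains c : Bool) = true
    · rw [if_pos hc, List.count_filter hc]
    · rw [if_neg (by simpa using hc), List.count_eq_zero]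
      intro hmem
      exact hc (List.of_mem_filter hmem)
  constructor
  · intro h
    have h1 := h '-'; have h2 := h '*'; have h3 := h '/'; have h4 := h '+'
    rw [hcount, hfc] at h1 h2 h3 h4
    simp only [show ("*/+-".toList.contains '-') = true from rfl,
      show ("*/+-".toList.contains '*') = true from rfl,
      show ("*/+-".toList.contains '/') = true from rfl,
      show ("*/+-".toList.contains '+') = true from rfl, if_true] at h1 h2 h3 h4
    unfold twoArgLimit at h1 h2 h3 h4
    simp at h1 h2 h3 h4
    exact ⟨by exact_mod_cast h1, by exact_mod_cast h2, by exact_mod_cast h3, by exact_mod_cast h4⟩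
  · intro ⟨h1, h2, h3, h4⟩ c
    rw [hcount, hfc]
    by_cases hc : ("*/+-".toList.contains c : Bool) = true
    · rw [if_pos hc]
      have hmem : c = '*' ∨ c = '/' ∨ c = '+' ∨ c = '-' := by
        have h := hc
        rw [show "*/+-".toList = ['*', '/', '+', '-'] from rfl] at h
        simpa using h
      rcases hmem with h | h | h | h <;> subst h <;>
        simp only [show twoArgLimit '*' = 1 from rfl, show twoArgLimit '/' = 1 from rfl,
          show twoArgLimit '+' = 1 from rfl, show twoArgLimit '-' = 2 from rfl] <;> omega
    · rw [if_neg (by simpa using hc)]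
      have := one_le_twoArgLimit c; push_cast; omega

-- ===== VERDICT (by name: the statement is the Claim_ definition above) =====
theorem two_arguements_check_spec : Claim_equal_two_arguements_check := by
  intro s _
  unfold Spec_two_arguements_check
  have := (portA_true_iff s).trans (portB_true_iff s).symm
  exact Bool.eq_iff_iff.mpr (by simpa using this)
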